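-- pv_equiv track=rewrite | github.com/darklab-sh/darklab-shell | scripts/benchmark_output_signals.py | _synthetic_lines
-- ===== SOURCE A (Python) =====
-- SAMPLE_LINES = [
--     "Starting Nmap 7.95 ( https://nmap.org ) at 2026-04-27 12:00 UTC",
--     "Nmap scan report for ip.darklab.sh (107.178.109.44)",
--     "80/tcp open http",
--     "443/tcp open https",
--     "Service Info: Host: darklab",
--     "darklab.sh has address 104.21.4.35",
--     "darklab.sh mail is handled by 10 mail.darklab.sh.",
--     "[medium] exposed-panel [http] [matched-at: https://ip.darklab.sh/admin]",
--     "WARNING: rate limited, retrying request",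
--     "ERROR: connection refused",
--     "[workspace] reading nmap/nmap_input.txt",
--     "[workspace] writing nmap/nmap_results.xml",
--     "Nmap done: 1 IP address (1 host up) scanned in 2.31 seconds",
--     "plain scanner chatter " + ("x" * 512),
--     "long non-matching line " + ("abcdef0123456789" * 256),
-- ]
--
-- def _synthetic_lines(size_mb: int) -> list[str]:
--     target_bytes = size_mb * 1024 * 1024
--     lines: list[str] = []
--     total = 0
--     index = 0
--     while total < target_bytes:
--         line = SAMPLE_LINES[index % len(SAMPLE_LINES)]
--         lines.append(line)
--         total += len(line) + 1
--         index += 1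
--     return lines
-- ===== SOURCE B (Python) =====
-- SAMPLE_LINES = [
--     "Starting Nmap 7.95 ( https://nmap.org ) at 2026-04-27 12:00 UTC",
--     "Nmap scan report for ip.darklab.sh (107.178.109.44)",
--     "80/tcp open http",
--     "443/tcp open https",
--     "Service Info: Host: darklab",
--     "darklab.sh has address 104.21.4.35",
--     "darklab.sh mail is handled by 10 mail.darklab.sh.",
--     "[medium] exposed-panel [http] [matched-at: https://ip.darklab.sh/admin]",
--     "WARNING: rate limited, retrying request",
--     "ERROR: connection refused",
--     "[workspace] reading nmap/nmap_input.txt",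
--     "[workspace] writing nmap/nmap_results.xml",
--     "Nmap done: 1 IP address (1 host up) scanned in 2.31 seconds",
--     "plain scanner chatter " + ("x" * 512),
--     "long non-matching line " + ("abcdef0123456789" * 256),
-- ]
--
--
-- def _synthetic_lines(size_mb: int) -> list[str]:
--     # Bulk of the output computed in closed form: k full cycles with k*S < target,
--     # then at most one partial pass over SAMPLE_LINES.
--     target_bytes = size_mb * 1024 * 1024
--     if target_bytes <= 0:
--         return []
--     cycle_cost = sum(len(line) + 1 for line in SAMPLE_LINES)
--     full_cycles = (target_bytes - 1) // cycle_cost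
--     lines = SAMPLE_LINES * full_cycles
--     total = full_cycles * cycle_cost
--     for line in SAMPLE_LINES:
--         if total >= target_bytes:
--             break
--         lines.append(line)
--         total += len(line) + 1
--     return lines
-- ===== Notes on version B (the rewrite author's own statement) =====
-- stated objective: alternative
-- what changed: B computes the bulk in closed form: with S the byte cost of one full cycle, it takes k = (target-1)//S full copies of SAMPLE_LINES at once (list multiplication) and then runs at most one partial pass over SAMPLE_LINES, instead of A's per-line while loop with an index-modulo lookup and a len() call per appended line.
import Mathlib
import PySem

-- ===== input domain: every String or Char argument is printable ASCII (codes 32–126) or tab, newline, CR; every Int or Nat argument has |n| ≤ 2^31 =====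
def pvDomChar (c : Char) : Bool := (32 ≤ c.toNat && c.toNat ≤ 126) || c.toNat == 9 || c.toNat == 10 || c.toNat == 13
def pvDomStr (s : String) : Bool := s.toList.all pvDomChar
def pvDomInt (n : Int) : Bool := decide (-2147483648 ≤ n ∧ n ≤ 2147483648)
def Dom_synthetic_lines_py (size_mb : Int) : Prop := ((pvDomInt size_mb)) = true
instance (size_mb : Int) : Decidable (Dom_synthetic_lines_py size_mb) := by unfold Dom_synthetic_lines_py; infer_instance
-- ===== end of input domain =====

-- B replaces A's per-line while loop by a closed-form bulk (k full copies of
-- SAMPLE_LINES with k*S < target, via list multiplication) plus at most one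
-- partial pass over SAMPLE_LINES.

-- ===== PORT A =====
-- module constant SAMPLE_LINES (the two trailing lines are built by string
-- concatenation/repetition in Python; ported as the same List Char construction)
def pvSampleLines : List String := [
  "Starting Nmap 7.95 ( https://nmap.org ) at 2026-04-27 12:00 UTC",
  "Nmap scan report for ip.darklab.sh (107.178.109.44)",
  "80/tcp open http",
  "443/tcp open https",
  "Service Info: Host: darklab",
  "darklab.sh has address 104.21.4.35",
  "darklab.sh mail is handled by 10 mail.darklab.sh.",
  "[medium] exposed-panel [http] [matched-at: https://ip.darklab.sh/admin]",
  "WARNING: rate limited, retrying request",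
  "ERROR: connection refused",
  "[workspace] reading nmap/nmap_input.txt",
  "[workspace] writing nmap/nmap_results.xml",
  "Nmap done: 1 IP address (1 host up) scanned in 2.31 seconds",
  String.ofList ("plain scanner chatter ".toList ++ List.replicate 512 'x'),
  String.ofList ("long non-matching line ".toList ++ (List.replicate 256 "abcdef0123456789".toList).flatten)]

-- needed by the ports' termination proofs
theorem pvStrLen_nonneg (s : String) : 0 ≤ PySem.Str.len s := by
  simp [PySem.Str.len_eq]

-- A's while loop; state (lines, total, index) exactly as in the Python.
-- SAMPLE_LINES[index % 15] is always in range (0 ≤ index % 15 < 15), so .getD "" is exact.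
def pvLoopA (target : Int) (lines : List String) (total : Int) (index : Int) : List String :=
  if h : total < target then
    let line := (PySem.List.pyGet? pvSampleLines (PySem.Int.mod index (PySem.List.len pvSampleLines))).getD ""
    pvLoopA target (lines ++ [line]) (total + (PySem.Str.len line + 1)) (index + 1)
  else lines
termination_by (target - total).toNat
decreasing_by
  have := pvStrLen_nonneg ((PySem.List.pyGet? pvSampleLines (PySem.Int.mod index (PySem.List.len pvSampleLines))).getD "")
  omega

def synthetic_lines_py (size_mb : Int) : List String :=
  pvLoopA (size_mb * 1024 * 1024) [] 0 0

-- ===== PORT B =====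
-- cycle_cost = sum(len(line) + 1 for line in SAMPLE_LINES)
def pvCycleCost : List String → Int
  | [] => 0
  | l :: ls => (PySem.Str.len l + 1) + pvCycleCost ls

-- B's final for-loop over SAMPLE_LINES with the early break (total >= target)
def pvPartial (target total : Int) : List String → List String
  | [] => []
  | l :: ls => if target ≤ total then [] else l :: pvPartial target (total + (PySem.Str.len l + 1)) ls

def synthetic_lines_py_alt (size_mb : Int) : List String :=
  let target_bytes := size_mb * 1024 * 1024
  if target_bytes ≤ 0 then []
  else
    let cycle_cost := pvCycleCost pvSampleLines
    let full_cycles := PySem.Int.floordiv (target_bytes - 1) cycle_cost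
    -- SAMPLE_LINES * full_cycles (full_cycles ≥ 0 here, so .toNat is exact)
    let lines := (List.replicate full_cycles.toNat pvSampleLines).flatten
    let total := full_cycles * cycle_cost
    lines ++ pvPartial target_bytes total pvSampleLines

-- ===== PRECONDITION & SPEC =====
def Spec_synthetic_lines_py (size_mb : Int) (out : List String) : Prop := out = synthetic_lines_py_alt size_mb
instance (size_mb : Int) (out : List String) : Decidable (Spec_synthetic_lines_py size_mb out) := by unfold Spec_synthetic_lines_py; infer_instance

-- ===== CLAIM (what is proved, stated in full; the proofs are below) =====
def Claim_equal_synthetic_lines_py : Prop := ∀ (size_mb : Int), Dom_synthetic_lines_py size_mb → Spec_synthetic_lines_py size_mb (synthetic_lines_py size_mb)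

-- ===== LEMMAS AND PROOFS =====

theorem pvSampleLines_ne_nil : pvSampleLines ≠ [] := List.cons_ne_nil _ _

theorem pvCycleCost_nonneg (xs : List String) : 0 ≤ pvCycleCost xs := by
  induction xs with
  | nil => simp [pvCycleCost]
  | cons l ls ih => have := pvStrLen_nonneg l; simp only [pvCycleCost]; omega

theorem pvCycleCost_dropLast (xs : List String) (h : xs ≠ []) :
    pvCycleCost xs.dropLast + 1 ≤ pvCycleCost xs := by
  induction xs with
  | nil => simp at h
  | cons l ls ih =>
    cases ls with
    | nil => simp [pvCycleCost, PySem.Str.len_eq]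
    | cons m ms =>
      have := ih (by simp)
      have := pvStrLen_nonneg l
      simp only [List.dropLast_cons_of_ne_nil (by simp : m :: ms ≠ [])] at *
      simp [pvCycleCost] at *
      omega

theorem pvLoopA_unfold (target lines total index) :
    pvLoopA target lines total index =
      if total < target then
        let line := (PySem.List.pyGet? pvSampleLines (PySem.Int.mod index (PySem.List.len pvSampleLines))).getD ""
        pvLoopA target (lines ++ [line]) (total + (PySem.Str.len line + 1)) (index + 1)
      else lines := by
  rw [pvLoopA]; simp

-- accumulator lemma
theorem pvLoopA_acc (target : Int) :
    ∀ (n : Nat) (total : Int), (target - total).toNat ≤ n →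
      ∀ (acc : List String) (index : Int),
        pvLoopA target acc total index = acc ++ pvLoopA target [] total index := by
  intro n
  induction n with
  | zero =>
    intro total h acc index
    rw [pvLoopA_unfold, pvLoopA_unfold target []]
    have : ¬ total < target := by omega
    simp [this]
  | succ m ih =>
    intro total h acc index
    rw [pvLoopA_unfold, pvLoopA_unfold target []]
    by_cases hlt : total < target
    · simp only [hlt, if_pos]
      set line := (PySem.List.pyGet? pvSampleLines (PySem.Int.mod index (PySem.List.len pvSampleLines))).getD "" with hline
      have hlen := pvStrLen_nonneg line
      have hm : (target - (total + (PySem.Str.len line + 1))).toNat ≤ m := by omega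
      simp only [List.nil_append]
      rw [ih _ hm (acc ++ [line]), ih _ hm [line]]
      simp
    · simp [hlt]

-- the loop depends on index only modulo 15
theorem pvLoopA_shift (target : Int) :
    ∀ (n : Nat) (total : Int), (target - total).toNat ≤ n →
      ∀ (acc : List String) (index : Int),
        pvLoopA target acc total (index + 15) = pvLoopA target acc total index := by
  intro n
  induction n with
  | zero =>
    intro total h acc index
    rw [pvLoopA_unfold, pvLoopA_unfold target acc total index]
    have : ¬ total < target := by omega
    simp [this]
  | succ m ih =>
    intro total h acc index
    rw [pvLoopA_unfold, pvLoopA_unfold target acc total index]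
    by_cases hlt : total < target
    · simp only [hlt, if_pos]
      have hmod : PySem.Int.mod (index + 15) (PySem.List.len pvSampleLines)
          = PySem.Int.mod index (PySem.List.len pvSampleLines) := by
        have h15 : PySem.List.len pvSampleLines = 15 := by decide
        rw [h15, PySem.Int.mod_eq_emod_of_pos (by norm_num),
            PySem.Int.mod_eq_emod_of_pos (by norm_num)]
        omega
      rw [hmod]
      set line := (PySem.List.pyGet? pvSampleLines (PySem.Int.mod index (PySem.List.len pvSampleLines))).getD "" with hline
      have hlen := pvStrLen_nonneg line
      have hm : (target - (total + (PySem.Str.len line + 1))).toNat ≤ m := by omega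
      have : index + 15 + 1 = (index + 1) + 15 := by ring
      rw [this, ih _ hm]
    · simp [hlt]

-- within one (possibly partial) cycle: if the target is reached inside the
-- remaining suffix `rest`, the loop equals B's partial pass over `rest`.
theorem pvLoopA_partial (target : Int) :
    ∀ (rest : List String) (i : Nat) (total : Int),
      pvSampleLines.drop i = rest → target ≤ total + pvCycleCost rest →
      pvLoopA target [] total (i : Int) = pvPartial target total rest := by
  intro rest
  induction rest with
  | nil =>
    intro i total hdrop hle
    simp [pvCycleCost] at hle
    rw [pvLoopA_unfold]
    have : ¬ total < target := by omega
    simp [this, pvPartial]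
  | cons l ls ih =>
    intro i total hdrop hle
    have hi : i < pvSampleLines.length := by
      by_contra hc
      rw [List.drop_eq_nil_of_le (by omega)] at hdrop
      exact (List.cons_ne_nil l ls) hdrop.symm
    have hlen15 : pvSampleLines.length = 15 := by decide
    have hget : pvSampleLines[i]? = some l := by
      rw [← List.head?_drop, hdrop]; rfl
    have hdrop' : pvSampleLines.drop (i + 1) = ls := by
      have : pvSampleLines.drop (i + 1) = (pvSampleLines.drop i).tail := by
        rw [← List.drop_drop]; simp
      rw [this, hdrop]; rfl
    rw [pvLoopA_unfold]
    by_cases hlt : total < target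
    · simp only [hlt, if_pos]
      have hmod : PySem.Int.mod (i : Int) (PySem.List.len pvSampleLines) = (i : Int) := by
        have h15 : PySem.List.len pvSampleLines = 15 := by decide
        rw [h15, PySem.Int.mod_eq_emod_of_pos (by norm_num)]
        omega
      rw [hmod]
      have hline : (PySem.List.pyGet? pvSampleLines (i : Int)).getD "" = l := by
        rw [PySem.List.pyGet?_natCast, hget]; rfl
      rw [hline]
      have hlen := pvStrLen_nonneg l
      rw [pvLoopA_acc target ((target - (total + (PySem.Str.len l + 1))).toNat) _ le_rfl]
      have hcast : (i : Int) + 1 = ((i + 1 : Nat) : Int) := by push_cast; ring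
      rw [hcast, ih (i + 1) _ hdrop' (by simp [pvCycleCost] at hle ⊢; omega)]
      simp [pvPartial, not_le.mpr hlt]
    · simp [hlt, pvPartial, le_of_not_gt hlt]

-- one full cycle: if the target is NOT reached before the last line of `rest`,
-- the loop emits all of `rest` and continues at index 15.
theorem pvLoopA_cycle (target : Int) :
    ∀ (rest : List String) (i : Nat) (total : Int),
      pvSampleLines.drop i = rest → i ≤ 15 →
      total + pvCycleCost rest.dropLast < target →
      pvLoopA target [] total (i : Int) =
        rest ++ pvLoopA target [] (total + pvCycleCost rest) 15 := by
  intro rest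
  induction rest with
  | nil =>
    intro i total hdrop hi15 _
    have hlen15 : pvSampleLines.length = 15 := by decide
    have : 15 ≤ i := by
      by_contra hc
      have := List.drop_eq_nil_iff.mp hdrop
      omega
    have hi : i = 15 := by omega
    subst hi
    simp [pvCycleCost]
  | cons l ls ih =>
    intro i total hdrop hi15 hcond
    have hlen15 : pvSampleLines.length = 15 := by decide
    have hi : i < 15 := by
      by_contra hc
      rw [List.drop_eq_nil_of_le (by omega)] at hdrop
      exact (List.cons_ne_nil l ls) hdrop.symm
    have hget : pvSampleLines[i]? = some l := by
      rw [← List.head?_drop, hdrop]; rfl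
    have hdrop' : pvSampleLines.drop (i + 1) = ls := by
      have : pvSampleLines.drop (i + 1) = (pvSampleLines.drop i).tail := by
        rw [← List.drop_drop]; simp
      rw [this, hdrop]; rfl
    have hlen := pvStrLen_nonneg l
    have hcostls := pvCycleCost_nonneg ls
    have hcostdl := pvCycleCost_nonneg ls.dropLast
    have hlt : total < target := by
      cases ls with
      | nil => simp [pvCycleCost] at hcond; omega
      | cons m ms =>
        rw [List.dropLast_cons_of_ne_nil (by simp)] at hcond
        simp [pvCycleCost] at hcond
        omega
    rw [pvLoopA_unfold]
    simp only [hlt, if_pos]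
    have hmod : PySem.Int.mod (i : Int) (PySem.List.len pvSampleLines) = (i : Int) := by
      have h15 : PySem.List.len pvSampleLines = 15 := by decide
      rw [h15, PySem.Int.mod_eq_emod_of_pos (by norm_num)]
      omega
    rw [hmod]
    have hline : (PySem.List.pyGet? pvSampleLines (i : Int)).getD "" = l := by
      rw [PySem.List.pyGet?_natCast, hget]; rfl
    rw [hline]
    rw [pvLoopA_acc target ((target - (total + (PySem.Str.len l + 1))).toNat) _ le_rfl]
    have hcast : (i : Int) + 1 = ((i + 1 : Nat) : Int) := by push_cast; ring
    cases ls with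
    | nil =>
      -- l is the last line: i = 14, the loop continues at index 15
      have hi14 : i = 14 := by
        have := hdrop'
        by_contra hne
        have hi' : i + 1 < 15 := by omega
        have : pvSampleLines.drop (i+1) ≠ [] := by
          intro hnil
          have := List.drop_eq_nil_iff.mp hnil
          omega
        exact this hdrop'
      subst hi14
      rw [hcast]
      simp only [pvCycleCost, add_zero, List.singleton_append, List.cons_append, List.nil_append]
      norm_num
    | cons m ms =>
      rw [hcast, ih (i + 1) _ hdrop' (by omega)
        (by rw [List.dropLast_cons_of_ne_nil (by simp)] at hcond;
            simp only [pvCycleCost] at hcond ⊢; omega)]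
      simp only [pvCycleCost, List.singleton_append, List.cons_append, List.nil_append,
        List.append_assoc]
      congr 2
      ring

-- k full cycles then the partial pass
theorem pvLoopA_main (target : Int) :
    ∀ (k : Nat) (total : Int),
      total + (k : Int) * pvCycleCost pvSampleLines < target →
      target ≤ total + ((k : Int) + 1) * pvCycleCost pvSampleLines →
      pvLoopA target [] total 0 =
        (List.replicate k pvSampleLines).flatten ++
          pvPartial target (total + (k : Int) * pvCycleCost pvSampleLines) pvSampleLines := by
  intro k
  induction k with
  | zero =>
    intro total h1 h2
    simp only [Nat.cast_zero, zero_mul, add_zero] at *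
    have hp := pvLoopA_partial target pvSampleLines 0 total rfl (by linarith)
    rw [Nat.cast_zero] at hp
    rw [hp]
    simp only [List.replicate_zero, List.flatten_nil, List.nil_append]
  | succ m ih =>
    intro total h1 h2
    have hS := pvCycleCost_nonneg pvSampleLines
    have hdl := pvCycleCost_dropLast pvSampleLines pvSampleLines_ne_nil
    have hdl0 := pvCycleCost_nonneg pvSampleLines.dropLast
    have hmS : 0 ≤ (m : Int) * pvCycleCost pvSampleLines :=
      mul_nonneg (Int.natCast_nonneg m) hS
    have hcond : total + pvCycleCost pvSampleLines.dropLast < target := by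
      push_cast at h1
      nlinarith
    have hcyc := pvLoopA_cycle target pvSampleLines 0 total rfl (by omega) hcond
    rw [Nat.cast_zero] at hcyc
    rw [hcyc]
    have hsh := pvLoopA_shift target ((target - (total + pvCycleCost pvSampleLines)).toNat)
      (total + pvCycleCost pvSampleLines) le_rfl [] 0
    rw [zero_add] at hsh
    rw [hsh]
    have hih := ih (total + pvCycleCost pvSampleLines) (by push_cast at h1 ⊢; linarith)
        (by push_cast at h2 ⊢; linarith)
    rw [hih]
    rw [List.replicate_succ, List.flatten_cons, List.append_assoc]
    congr 2
    push_cast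
    ring

-- ===== VERDICT (by name: the statement is the Claim_ definition above) =====
theorem synthetic_lines_py_spec : Claim_equal_synthetic_lines_py := by
  intro size_mb _
  unfold Spec_synthetic_lines_py synthetic_lines_py synthetic_lines_py_alt
  set t := size_mb * 1024 * 1024 with ht
  by_cases h0 : t ≤ 0
  · rw [pvLoopA_unfold, if_neg (show ¬ (0 : Int) < t by omega), if_pos h0]
  · simp only [h0, if_neg, if_false]
    have hS : 1 ≤ pvCycleCost pvSampleLines := by
      have := pvCycleCost_dropLast pvSampleLines pvSampleLines_ne_nil
      have := pvCycleCost_nonneg pvSampleLines.dropLast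
      omega
    set S := pvCycleCost pvSampleLines with hSdef
    have hfd : PySem.Int.floordiv (t - 1) S = (t - 1) / S :=
      PySem.Int.floordiv_eq_ediv_of_pos (by omega)
    set k := PySem.Int.floordiv (t - 1) S with hkdef
    have hk0 : 0 ≤ k := by
      rw [hfd]
      exact Int.ediv_nonneg (by omega) (by omega)
    have hdm := Int.ediv_add_emod (t - 1) S
    have hr0 : 0 ≤ (t - 1) % S := Int.emod_nonneg _ (by omega)
    have hrS : (t - 1) % S < S := Int.emod_lt_of_pos _ (by omega)
    have hk1 : k * S < t := by
      rw [hfd]; nlinarith [hdm]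
    have hk2 : t ≤ (k + 1) * S := by
      rw [hfd]; nlinarith [hdm]
    have hcast : ((k.toNat : Int)) = k := Int.toNat_of_nonneg hk0
    have hm := pvLoopA_main t k.toNat 0 (by rw [hcast, zero_add]; exact hk1) (by rw [hcast, zero_add]; exact hk2)
    rw [hcast, zero_add] at hm
    rw [hm]
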